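-- pv_equiv track=rewrite | github.com/csoueidi/pyjdb | pyjdwp/sexpr_helpers.py | fix_unclosed_quotes_in_line
-- ===== SOURCE A (Python) =====
-- def fix_unclosed_quotes_in_line(line):
--     """
--     Fixes unclosed quotes in a single line, ensuring not to close quotes prematurely
--     within valid s-expression syntax.
--     """
--     new_line = ""
--     quote_open = False
--     for char in line:
--         if char == '"' and not quote_open:
--             quote_open = True
--         elif char == '"' and quote_open:
--             quote_open = False
--         new_line += char
--     if quote_open:
--         new_line += '"'
--     return new_line
-- ===== SOURCE B (Python) =====
-- def fix_unclosed_quotes_in_line(line):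
--     """Append a closing quote iff the line contains an odd number of '"'."""
--     return line + ('"' if line.count('"') % 2 == 1 else '')
-- ===== Notes on version B (the rewrite author's own statement) =====
-- stated objective: simpler
-- what changed: Replaces the char-by-char string rebuild loop with a toggled open/closed flag by a single str.count parity test on the number of double-quote characters followed by one conditional append.
import Mathlib
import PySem

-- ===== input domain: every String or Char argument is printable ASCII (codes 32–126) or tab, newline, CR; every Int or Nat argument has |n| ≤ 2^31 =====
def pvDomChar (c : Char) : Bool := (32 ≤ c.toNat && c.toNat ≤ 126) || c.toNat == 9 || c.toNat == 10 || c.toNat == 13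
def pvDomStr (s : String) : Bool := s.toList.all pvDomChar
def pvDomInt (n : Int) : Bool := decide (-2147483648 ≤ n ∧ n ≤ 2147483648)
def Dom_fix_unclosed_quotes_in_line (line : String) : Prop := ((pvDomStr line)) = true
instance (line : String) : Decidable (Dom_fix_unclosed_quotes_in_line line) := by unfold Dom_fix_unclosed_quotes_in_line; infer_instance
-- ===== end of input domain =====

-- B replaces A's char-by-char rebuild loop with a toggled flag by a parity test on the quote count (objective: simpler).

-- ===== PORT A =====
-- state: (new_line, quote_open); branches in A's order, 'new_line += char' after them
def fix_unclosed_quotes_in_line (line : String) : String :=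
  let st := line.toList.foldl
    (fun (st : String × Bool) char =>
      let st' :=
        if char == '"' && !st.2 then (st.1, true)
        else if char == '"' && st.2 then (st.1, false)
        else st
      (st'.1 ++ char.toString, st'.2))
    ("", false)
  if st.2 then st.1 ++ "\"" else st.1

-- ===== PORT B =====
def fix_unclosed_quotes_in_line_alt (line : String) : String :=
  line ++ (if PySem.Str.count line "\"" % 2 == 1 then "\"" else "")

-- ===== PRECONDITION & SPEC =====
def Spec_fix_unclosed_quotes_in_line (line : String) (out : String) : Prop := out = fix_unclosed_quotes_in_line_alt line
instance (line : String) (out : String) : Decidable (Spec_fix_unclosed_quotes_in_line line out) := by unfold Spec_fix_unclosed_quotes_in_line; infer_instance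

-- ===== CLAIM (what is proved, stated in full; the proofs are below) =====
def Claim_equal_fix_unclosed_quotes_in_line : Prop := ∀ (line : String), Dom_fix_unclosed_quotes_in_line line → Spec_fix_unclosed_quotes_in_line line (fix_unclosed_quotes_in_line line)

-- ===== LEMMAS AND PROOFS =====

-- PySem.Chars.count.go with a one-char needle counts occurrences of that char
theorem pv_count_go_singleton (c : Char) :
    ∀ (fuel : Nat) (l : List Char) (acc : Nat), l.length ≤ fuel →
      PySem.Chars.count.go [c] fuel l acc = acc + l.count c := by
  intro fuel
  induction fuel with
  | zero =>
    intro l acc h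
    cases l with
    | nil => simp [PySem.Chars.count.go]
    | cons a t => simp at h
  | succ n ih =>
    intro l acc h
    cases l with
    | nil => simp [PySem.Chars.count.go]
    | cons a t =>
      simp only [PySem.Chars.count.go, List.isPrefixOf, List.length_cons] at *
      by_cases hac : c = a
      · subst hac
        simp only [beq_self_eq_true, Bool.true_and, if_true,
          List.count_cons_self]
        simp only [List.length_nil, List.drop_zero, List.drop_succ_cons]
        rw [ih t (acc + 1) (by omega)]
        omega
      · have hb : (c == a) = false := by simp [hac]
        simp only [hb, Bool.false_and, List.count_cons_of_ne (fun h => hac h.symm)]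
        simp only [Bool.false_eq_true, if_false]
        exact ih t acc (by omega)

theorem pv_str_count_quote (line : String) :
    PySem.Str.count line "\"" = line.toList.count '"' := by
  have h : PySem.Chars.count line.toList ['"'] = line.toList.count '"' := by
    unfold PySem.Chars.count
    rw [if_neg (by decide)]
    simpa using pv_count_go_singleton '"' line.toList.length line.toList 0 (le_refl _)
  simpa [PySem.Str.count] using h

-- A's fold rebuilds the string and its flag is the parity of the quote count
theorem pv_foldA (l : List Char) : ∀ (s : String) (b : Bool),
    l.foldl
      (fun (st : String × Bool) char =>
        let st' :=
          if char == '"' && !st.2 then (st.1, true)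
          else if char == '"' && st.2 then (st.1, false)
          else st
        (st'.1 ++ char.toString, st'.2))
      (s, b)
    = (s ++ String.ofList l, xor b (l.count '"' % 2 == 1)) := by
  induction l with
  | nil =>
    intro s b
    simp only [List.foldl_nil, List.count_nil]
    refine Prod.ext ?_ (by simp)
    rw [← String.toList_inj]; simp
  | cons a t ih =>
    intro s b
    have happ : (s ++ a.toString) ++ String.ofList t = s ++ String.ofList (a :: t) := by
      rw [← String.toList_inj]; simp
    by_cases ha : a = '"'
    · subst ha
      cases b with
      | false =>
        simp only [List.foldl_cons, beq_self_eq_true, Bool.not_false, Bool.true_and, if_true]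
        rw [ih, happ]
        refine Prod.ext rfl ?_
        simp only [List.count_cons_self, Bool.false_xor, Bool.true_xor]
        rcases Nat.mod_two_eq_zero_or_one (t.count '"') with h | h <;>
          simp [Nat.add_mod, h]
      | true =>
        simp only [List.foldl_cons, beq_self_eq_true, Bool.not_true,
          Bool.and_false, Bool.false_eq_true, if_false, Bool.and_true, if_true]
        rw [ih, happ]
        refine Prod.ext rfl ?_
        simp only [List.count_cons_self, Bool.false_xor, Bool.true_xor]
        rcases Nat.mod_two_eq_zero_or_one (t.count '"') with h | h <;>
          simp [Nat.add_mod, h]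
    · have hb : (a == '"') = false := by simp [ha]
      simp only [List.foldl_cons, hb, Bool.false_and, Bool.false_eq_true, if_false]
      rw [ih, happ]
      simp [List.count_cons_of_ne ha]

-- ===== VERDICT (by name: the statement is the Claim_ definition above) =====
theorem fix_unclosed_quotes_in_line_spec : Claim_equal_fix_unclosed_quotes_in_line := by
  intro line _
  unfold Spec_fix_unclosed_quotes_in_line fix_unclosed_quotes_in_line fix_unclosed_quotes_in_line_alt
  rw [pv_str_count_quote, pv_foldA]
  simp only [String.ofList_toList, Bool.false_xor]
  by_cases h : (line.toList.count '"' % 2 == 1) = true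
  · simp [h]
  · simp only [Bool.not_eq_true] at h
    simp only [h, Bool.false_eq_true, if_false]
    rw [← String.toList_inj]; simp
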